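-- pv_equiv track=rewrite | github.com/FociSolutions/github-foundations | organizations/.github/scripts/gh_foundations/gh_foundations.py | find_orgs_from_filenames
-- ===== SOURCE A (Python) =====
-- def find_orgs_from_filenames(hcl_files, index_of_key=5)->dict:
--     """ Find all orgs given a set of terragrunt.hcl file paths
--
--     Args:
--         hcl_files (list): A list of terragrunt.hcl file paths
--         index_of_key (int): The index of the Org name in the path. Default is 5
--     Returns:
--         dict: A dictionary with the org name as the key and a list of paths
--               to the terragrunt.hcl files as the value
--     """
--     names = {}
--     for file in hcl_files:
--         dirs = file.split('/')
--         # Add a key/value pair of org name / path to the hcl file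
--         # The key is the name of the 3rd dir from the root
--         org_name = dirs[index_of_key]
--         if org_name not in names:
--             names[org_name] = []
--         names[org_name].append(file)
--
--     return names
-- ===== SOURCE B (Python) =====
-- def find_orgs_from_filenames(hcl_files, index_of_key=5) -> dict:
--     """Group terragrunt.hcl file paths by the org-name path component."""
--     keys = [f.split('/')[index_of_key] for f in hcl_files]
--     return {k: [f for f, kk in zip(hcl_files, keys) if kk == k]
--             for k in dict.fromkeys(keys)}
-- ===== Notes on version B (the rewrite author's own statement) =====
-- stated objective: alternative
-- what changed: B precomputes all org keys in one pass, deduplicates them in first-occurrence order, and builds each group by filtering the zipped (file,key) list, instead of A's incremental dict-bucketing with membership tests and appends.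
import Mathlib
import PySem

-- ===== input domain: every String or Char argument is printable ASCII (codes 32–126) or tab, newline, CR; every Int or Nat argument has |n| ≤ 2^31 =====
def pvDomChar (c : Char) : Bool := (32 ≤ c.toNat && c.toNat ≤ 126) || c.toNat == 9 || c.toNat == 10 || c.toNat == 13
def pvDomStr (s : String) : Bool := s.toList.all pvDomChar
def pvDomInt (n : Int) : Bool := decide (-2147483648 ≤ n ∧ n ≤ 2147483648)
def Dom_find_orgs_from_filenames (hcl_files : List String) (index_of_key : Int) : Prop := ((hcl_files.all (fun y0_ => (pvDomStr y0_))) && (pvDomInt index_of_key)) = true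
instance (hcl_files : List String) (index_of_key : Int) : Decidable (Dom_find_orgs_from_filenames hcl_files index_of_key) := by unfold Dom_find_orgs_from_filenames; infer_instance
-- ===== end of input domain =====

-- B groups by precomputing every org key, deduplicating them in first-occurrence order
-- and filtering the zipped (file, key) list once per distinct org, instead of A's
-- incremental dict-bucketing; same return value wherever A returns (objective: alternative).

-- f.split('/') for both ports (sep "/" is nonempty, so split? never returns none)
def pvSplit (f : String) : List String := (PySem.Str.split? f "/").getD []

-- ===== PORT A =====
def find_orgs_from_filenames (hcl_files : List String) (index_of_key : Int) : List (String × List String) :=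
  (hcl_files.foldl (fun names file =>
      let dirs := pvSplit file
      match PySem.List.pyGet? dirs index_of_key with
      | none => names   -- IndexError in Python; excluded by Pre_
      | some org_name =>
        let names' := if names.contains org_name then names else names.insert org_name ([] : List String)
        names'.modify org_name [] (· ++ [file])
    ) (PySem.Dict.empty : PySem.Dict String (List String))).items

-- ===== PORT B =====
def find_orgs_from_filenames_alt (hcl_files : List String) (index_of_key : Int) : List (String × List String) :=
  let keys := hcl_files.map (fun f =>
    (PySem.List.pyGet? (pvSplit f) index_of_key).getD "")   -- raising indexing in Python; excluded by Pre_
  (PySem.List.dedup keys).map (fun k =>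
    (k, ((hcl_files.zip keys).filter (fun p => p.2 == k)).map (·.1)))

-- ===== PRECONDITION & SPEC =====
-- Pre_ excludes exactly the inputs where some path has too few '/'-separated components,
-- on which Python A (and B alike) raise IndexError.
def Pre_find_orgs_from_filenames (hcl_files : List String) (index_of_key : Int) : Prop :=
  ∀ f ∈ hcl_files, PySem.Raise.InRange (pvSplit f).length index_of_key
instance (hcl_files : List String) (index_of_key : Int) : Decidable (Pre_find_orgs_from_filenames hcl_files index_of_key) := by unfold Pre_find_orgs_from_filenames; infer_instance

def pvWitness_find_orgs_from_filenames : List String × Int := (["a/b/c/d/e/f/g", "a/b/c/d/e/f2/h"], 5)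

def Spec_find_orgs_from_filenames (hcl_files : List String) (index_of_key : Int) (out : List (String × List String)) : Prop := out = find_orgs_from_filenames_alt hcl_files index_of_key
instance (hcl_files : List String) (index_of_key : Int) (out : List (String × List String)) : Decidable (Spec_find_orgs_from_filenames hcl_files index_of_key out) := by unfold Spec_find_orgs_from_filenames; infer_instance

-- ===== CLAIM (what is proved, stated in full; the proofs are below) =====
def Claim_equal_find_orgs_from_filenames : Prop := ∀ (hcl_files : List String) (index_of_key : Int), Dom_find_orgs_from_filenames hcl_files index_of_key → Pre_find_orgs_from_filenames hcl_files index_of_key → Spec_find_orgs_from_filenames hcl_files index_of_key (find_orgs_from_filenames hcl_files index_of_key)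

-- ===== LEMMAS AND PROOFS =====

-- the org key of one file, as both ports compute it under Pre_
def pvKey (index_of_key : Int) (f : String) : String :=
  (PySem.List.pyGet? (pvSplit f) index_of_key).getD ""

-- A's "ensure key, then append" collapses to a single Dict.modify
theorem pv_step_eq (d : PySem.Dict String (List String)) (k : String) (f : String) :
    ((if d.contains k then d else d.insert k ([] : List String)).modify k [] (· ++ [f]))
      = d.modify k [] (· ++ [f]) := by
  by_cases hc : d.contains k = true
  · simp [hc]
  · simp only [hc, if_neg, Bool.not_eq_true]
    rw [PySem.Dict.modify, PySem.Dict.getD_insert_self, PySem.Dict.insert_insert_self,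
      PySem.Dict.modify]
    congr 1
    have hnone : d.get? k = none := by
      have h2 := PySem.Dict.contains_eq_isSome_get? d k
      rw [Bool.eq_false_iff.mpr hc] at h2
      exact Option.not_isSome_iff_eq_none.mp (by simp [← h2])
    simp [PySem.Dict.getD, hnone]

-- under Pre_, A's loop is a plain grouping fold keyed by pvKey
theorem pv_foldl_eq (hcl_files : List String) (index_of_key : Int)
    (h : Pre_find_orgs_from_filenames hcl_files index_of_key) :
    (hcl_files.foldl (fun names file =>
      match PySem.List.pyGet? (pvSplit file) index_of_key with
      | none => names
      | some org_name =>
        (if names.contains org_name then names else names.insert org_name ([] : List String)).modify org_name [] (· ++ [file])) (PySem.Dict.empty : PySem.Dict String (List String)))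
    = hcl_files.foldl (fun names file => names.modify (pvKey index_of_key file) [] (· ++ [file])) PySem.Dict.empty := by
  apply PySem.List.foldl_congr_mem
  intro acc x hx
  have hin := h x hx
  obtain ⟨v, hv⟩ : ∃ v, PySem.List.pyGet? (pvSplit x) index_of_key = some v := by
    rcases heq : PySem.List.pyGet? (pvSplit x) index_of_key with _ | v
    · exact absurd hin (by rwa [← PySem.List.pyGet?_eq_none_iff])
    · exact ⟨v, rfl⟩
  simp only [hv, pvKey, Option.getD_some]
  exact pv_step_eq acc v x

-- ===== VERDICT (by name: the statement is the Claim_ definition above) =====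
theorem find_orgs_from_filenames_spec : Claim_equal_find_orgs_from_filenames := by
  intro hcl_files index_of_key _ hpre
  unfold Spec_find_orgs_from_filenames find_orgs_from_filenames find_orgs_from_filenames_alt
  dsimp only
  rw [pv_foldl_eq hcl_files index_of_key hpre]
  have hnd : (hcl_files.foldl (fun names file => names.modify (pvKey index_of_key file) [] (· ++ [file])) (PySem.Dict.empty : PySem.Dict String (List String))).keys.Nodup := by
    exact PySem.Dict.nodup_keys_foldl_modify_key hcl_files (pvKey index_of_key) []
      (fun d x => fun v => v ++ [x]) PySem.Dict.empty (by simp [PySem.Dict.keys_empty])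
  rw [PySem.Dict.items_eq_map_keys _ hnd []]
  rw [PySem.Dict.keys_foldl_modify_key hcl_files (pvKey index_of_key) []
    (fun d x => fun v => v ++ [x]) PySem.Dict.empty]
  rw [PySem.Dict.keys_empty, PySem.Set.update_nil_left]
  have hkeys : hcl_files.map (fun f => (PySem.List.pyGet? (pvSplit f) index_of_key).getD "") = hcl_files.map (pvKey index_of_key) := rfl
  rw [hkeys, PySem.List.dedup_eq_ofList]
  apply List.map_congr_left
  intro k hk
  congr 1
  -- left group: the dict's bucket at k; right group: B's zip-filter
  have hfold : (hcl_files.foldl (fun names file => names.modify (pvKey index_of_key file) [] (· ++ [file])) (PySem.Dict.empty : PySem.Dict String (List String)))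
      = ((hcl_files.map (fun f => (pvKey index_of_key f, f))).foldl (fun d p => d.modify p.1 [] (· ++ [p.2])) PySem.Dict.empty) := by
    rw [List.foldl_map]
  rw [hfold, PySem.Dict.getD_foldl_modify_append]
  have hzip : hcl_files.zip (hcl_files.map (pvKey index_of_key)) = hcl_files.map (fun f => (f, pvKey index_of_key f)) := by
    have := List.zip_map' (f := (id : String → String)) (g := pvKey index_of_key) (l := hcl_files)
    simpa using this
  rw [hzip]
  simp [List.filter_map, List.map_map, Function.comp_def]
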